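-- pv_equiv track=rewrite | github.com/mbaocha/dialogcart | src/luma/grouping/reservation_intent_resolver.py | _select_best_signal_match
-- ===== SOURCE A (Python) =====
-- from typing import Tuple, Dict, Any, List, Set, Optional
--
-- DISCOVERY = "DISCOVERY"
--
-- DETAILS = "DETAILS"
--
-- AVAILABILITY = "AVAILABILITY"
--
-- QUOTE = "QUOTE"
--
-- RECOMMENDATION = "RECOMMENDATION"
--
-- CREATE_APPOINTMENT = "CREATE_APPOINTMENT"
--
-- CREATE_RESERVATION = "CREATE_RESERVATION"
--
-- BOOKING_INQUIRY = "BOOKING_INQUIRY"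
--
-- MODIFY_BOOKING = "MODIFY_BOOKING"
--
-- CANCEL_BOOKING = "CANCEL_BOOKING"
--
-- PAYMENT = "PAYMENT"
--
-- CONFIRM_BOOKING = "CONFIRM_BOOKING"
--
-- PAYMENT_STATUS = "PAYMENT_STATUS"
--
-- REJECT_OR_CHANGE = "REJECT_OR_CHANGE"
--
-- def _select_best_signal_match(
--
--     matching_intents: List[str]
-- ) -> Optional[str]:
--     """
--     Select the best matching intent from signal-matching intents.
--
--     Uses priority ordering: destructive/sensitive → booking → informational
--     """
--     # Priority order (higher priority checked first)
--     priority_order = [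
--         PAYMENT,
--         CANCEL_BOOKING,
--         MODIFY_BOOKING,
--         BOOKING_INQUIRY,
--         AVAILABILITY,
--         CREATE_APPOINTMENT,
--         CREATE_RESERVATION,
--         QUOTE,
--         DETAILS,
--         DISCOVERY,
--         RECOMMENDATION,
--         CONFIRM_BOOKING,
--         PAYMENT_STATUS,
--         REJECT_OR_CHANGE,
--     ]
--
--     # Return first matching intent in priority order
--     for intent in priority_order:
--         if intent in matching_intents:
--             return intent
--
--     # If no priority match, return first in list
--     return matching_intents[0] if matching_intents else None
-- ===== SOURCE B (Python) =====
-- from typing import List, Optional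
--
-- DISCOVERY = "DISCOVERY"
-- DETAILS = "DETAILS"
-- AVAILABILITY = "AVAILABILITY"
-- QUOTE = "QUOTE"
-- RECOMMENDATION = "RECOMMENDATION"
-- CREATE_APPOINTMENT = "CREATE_APPOINTMENT"
-- CREATE_RESERVATION = "CREATE_RESERVATION"
-- BOOKING_INQUIRY = "BOOKING_INQUIRY"
-- MODIFY_BOOKING = "MODIFY_BOOKING"
-- CANCEL_BOOKING = "CANCEL_BOOKING"
-- PAYMENT = "PAYMENT"
-- CONFIRM_BOOKING = "CONFIRM_BOOKING"
-- PAYMENT_STATUS = "PAYMENT_STATUS"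
-- REJECT_OR_CHANGE = "REJECT_OR_CHANGE"
--
-- _PRIORITY = [
--     PAYMENT,
--     CANCEL_BOOKING,
--     MODIFY_BOOKING,
--     BOOKING_INQUIRY,
--     AVAILABILITY,
--     CREATE_APPOINTMENT,
--     CREATE_RESERVATION,
--     QUOTE,
--     DETAILS,
--     DISCOVERY,
--     RECOMMENDATION,
--     CONFIRM_BOOKING,
--     PAYMENT_STATUS,
--     REJECT_OR_CHANGE,
-- ]
--
-- _RANK = {intent: i for i, intent in enumerate(_PRIORITY)}
--
--
-- def _select_best_signal_match(matching_intents: List[str]) -> Optional[str]: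
--     """Single pass over the input, keeping the best-ranked known intent."""
--     best = None  # (rank, intent)
--     for intent in matching_intents:
--         r = _RANK.get(intent)
--         if r is not None and (best is None or r < best[0]):
--             best = (r, intent)
--     if best is not None:
--         return best[1]
--     return matching_intents[0] if matching_intents else None
-- ===== Notes on version B (the rewrite author's own statement) =====
-- stated objective: faster
-- what changed: A iterates over the 14-intent priority list doing a full membership scan of the input for each priority; B builds a rank table once and makes a single pass over matching_intents keeping the minimum-rank known intent, with the same head-or-None fallback.
import Mathlib
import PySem

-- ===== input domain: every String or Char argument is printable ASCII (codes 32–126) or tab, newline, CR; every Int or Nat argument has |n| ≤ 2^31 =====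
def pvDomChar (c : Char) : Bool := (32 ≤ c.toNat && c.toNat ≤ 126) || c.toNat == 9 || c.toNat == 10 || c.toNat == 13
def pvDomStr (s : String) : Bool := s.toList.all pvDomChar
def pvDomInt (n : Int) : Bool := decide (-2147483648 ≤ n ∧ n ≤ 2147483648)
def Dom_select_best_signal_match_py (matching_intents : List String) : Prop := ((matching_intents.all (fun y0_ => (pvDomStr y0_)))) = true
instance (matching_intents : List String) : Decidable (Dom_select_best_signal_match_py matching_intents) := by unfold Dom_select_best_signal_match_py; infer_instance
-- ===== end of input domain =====

-- B replaces A's scan of the priority list (one membership test of the whole input per priority)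
-- by a single pass over the input keeping the minimum-rank known intent under a rank table (objective: alternative).

-- ===== PORT A =====
-- the priority_order list literal of A
def pvPriority : List String :=
  ["PAYMENT", "CANCEL_BOOKING", "MODIFY_BOOKING", "BOOKING_INQUIRY", "AVAILABILITY",
   "CREATE_APPOINTMENT", "CREATE_RESERVATION", "QUOTE", "DETAILS", "DISCOVERY",
   "RECOMMENDATION", "CONFIRM_BOOKING", "PAYMENT_STATUS", "REJECT_OR_CHANGE"]

-- 'for intent in priority_order: if intent in matching_intents: return intent', then
-- 'return matching_intents[0] if matching_intents else None'
def pvLoopA : List String → List String → Option String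
  | [], xs => xs.head?
  | p :: ps, xs => if xs.contains p then some p else pvLoopA ps xs

def select_best_signal_match_py (matching_intents : List String) : Option String :=
  pvLoopA pvPriority matching_intents

-- ===== PORT B =====
-- _RANK = {intent: i for i, intent in enumerate(_PRIORITY)}
def pvRank : PySem.Dict String Int :=
  PySem.Dict.ofList ((PySem.List.enumerate pvPriority).map (fun p => (p.2, p.1)))

-- loop body: r = _RANK.get(intent); if r is not None and (best is None or r < best[0]): best = (r, intent)
def pvStepB (best : Option (Int × String)) (intent : String) : Option (Int × String) :=
  match pvRank.get? intent with
  | none => best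
  | some r =>
    match best with
    | none => some (r, intent)
    | some b => if r < b.1 then some (r, intent) else best

def select_best_signal_match_py_alt (matching_intents : List String) : Option String :=
  match matching_intents.foldl pvStepB none with
  | some b => some b.2
  | none => matching_intents.head?

-- ===== PRECONDITION & SPEC =====
def Spec_select_best_signal_match_py (matching_intents : List String) (out : Option String) : Prop := out = select_best_signal_match_py_alt matching_intents
instance (matching_intents : List String) (out : Option String) : Decidable (Spec_select_best_signal_match_py matching_intents out) := by unfold Spec_select_best_signal_match_py; infer_instance

-- ===== CLAIM (what is proved, stated in full; the proofs are below) =====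
def Claim_equal_select_best_signal_match_py : Prop := ∀ (matching_intents : List String), Dom_select_best_signal_match_py matching_intents → Spec_select_best_signal_match_py matching_intents (select_best_signal_match_py matching_intents)

-- ===== LEMMAS AND PROOFS =====

-- the rank table as a literal association list
def pvPairs : List (String × Int) :=
  [("PAYMENT",0),("CANCEL_BOOKING",1),("MODIFY_BOOKING",2),("BOOKING_INQUIRY",3),
   ("AVAILABILITY",4),("CREATE_APPOINTMENT",5),("CREATE_RESERVATION",6),("QUOTE",7),
   ("DETAILS",8),("DISCOVERY",9),("RECOMMENDATION",10),("CONFIRM_BOOKING",11),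
   ("PAYMENT_STATUS",12),("REJECT_OR_CHANGE",13)]

set_option maxHeartbeats 1000000 in
theorem pvRank_mk : pvRank = PySem.Dict.mk pvPairs := by rfl

theorem pvGet?_mem (ps : List (String × Int)) (s : String) (r : Int)
    (h : (PySem.Dict.mk ps).get? s = some r) : (s, r) ∈ ps := by
  induction ps with
  | nil => simp [PySem.Dict.get?] at h
  | cons p ps ih =>
    obtain ⟨k, v⟩ := p
    rw [PySem.Dict.get?_mk_cons] at h
    by_cases hk : k == s
    · rw [if_pos hk] at h
      have : s = k := (eq_of_beq hk).symm
      subst this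
      simp [Option.some.inj h]
    · rw [if_neg hk] at h
      exact List.mem_cons_of_mem _ (ih h)

theorem pvRank_cases (s : String) (r : Int) (h : pvRank.get? s = some r) : (s, r) ∈ pvPairs := by
  rw [pvRank_mk] at h
  exact pvGet?_mem pvPairs s r h

-- left-biased minimum on optional (rank, intent) pairs
def pvMinL : Option (Int × String) → Option (Int × String) → Option (Int × String)
  | none, o => o
  | some b, none => some b
  | some b, some c => if c.1 < b.1 then some c else some b

theorem pvStepB_eq (b : Option (Int × String)) (x : String) :
    pvStepB b x = pvMinL b (pvStepB none x) := by
  unfold pvStepB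
  cases pvRank.get? x <;> cases b <;> simp [pvMinL]

theorem pvMinL_none (b : Option (Int × String)) : pvMinL b none = b := by
  cases b <;> rfl

theorem pvMinL_assoc (a b c : Option (Int × String)) :
    pvMinL (pvMinL a b) c = pvMinL a (pvMinL b c) := by
  cases a <;> cases b <;> cases c <;> simp only [pvMinL] <;>
    (try split_ifs) <;> simp only [pvMinL] <;> (try split_ifs) <;> first | rfl | omega

theorem pvFold_acc (xs : List String) : ∀ b,
    xs.foldl pvStepB b = pvMinL b (xs.foldl pvStepB none) := by
  induction xs with
  | nil => intro b; simp [pvMinL_none]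
  | cons x xs ih =>
    intro b
    simp only [List.foldl_cons]
    rw [ih (pvStepB b x), ih (pvStepB none x), pvStepB_eq b x, pvMinL_assoc]

theorem pvFold_cons (x : String) (xs : List String) :
    (x :: xs).foldl pvStepB none = pvMinL (pvStepB none x) (xs.foldl pvStepB none) := by
  simp only [List.foldl_cons]
  rw [pvFold_acc xs (pvStepB none x)]

-- if the fold yields nothing, no element of xs is a known intent
theorem pvFold_none (xs : List String) (h : xs.foldl pvStepB none = none) :
    ∀ x ∈ xs, pvRank.get? x = none := by
  induction xs with
  | nil => simp
  | cons y ys ih =>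
    rw [pvFold_cons] at h
    have hy : pvStepB none y = none := by
      cases hs : pvStepB none y with
      | none => rfl
      | some b =>
        exfalso
        rw [hs] at h
        cases hfy : ys.foldl pvStepB none with
        | none => rw [hfy] at h; simp [pvMinL] at h
        | some c => rw [hfy] at h; simp only [pvMinL] at h; split at h <;> simp_all
    have hf : ys.foldl pvStepB none = none := by
      rw [hy] at h; simpa [pvMinL] using h
    intro x hx
    rcases List.mem_cons.mp hx with rfl | hx'
    · cases hr : pvRank.get? x with
      | none => rfl
      | some v =>
        exfalso
        simp [pvStepB, hr] at hy
    · exact ih hf x hx'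

-- if the fold yields (r, s): s occurs in xs with rank r, and r is minimal among ranks in xs
theorem pvFold_some (xs : List String) (r : Int) (s : String)
    (h : xs.foldl pvStepB none = some (r, s)) :
    s ∈ xs ∧ pvRank.get? s = some r ∧ ∀ x ∈ xs, ∀ r', pvRank.get? x = some r' → r ≤ r' := by
  induction xs generalizing r s with
  | nil => simp at h
  | cons y ys ih =>
    rw [pvFold_cons] at h
    cases hy : pvRank.get? y with
    | none =>
      have hstep : pvStepB none y = none := by simp [pvStepB, hy]
      rw [hstep] at h
      simp only [pvMinL] at h
      obtain ⟨hmem, hrk, hmin⟩ := ih r s h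
      refine ⟨List.mem_cons_of_mem _ hmem, hrk, ?_⟩
      intro x hx r' hr'
      rcases List.mem_cons.mp hx with rfl | hx'
      · rw [hy] at hr'; cases hr'
      · exact hmin x hx' r' hr'
    | some ry =>
      have hstep : pvStepB none y = some (ry, y) := by simp [pvStepB, hy]
      rw [hstep] at h
      cases hf : ys.foldl pvStepB none with
      | none =>
        rw [hf] at h
        simp only [pvMinL, Option.some.injEq, Prod.mk.injEq] at h
        obtain ⟨rfl, rfl⟩ := h
        refine ⟨List.mem_cons_self .., hy, ?_⟩
        intro x hx r' hr'
        rcases List.mem_cons.mp hx with rfl | hx'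
        · rw [hy] at hr'
          exact le_of_eq (Option.some.inj hr')
        · rw [pvFold_none ys hf x hx'] at hr'; cases hr'
      | some c =>
        rw [hf] at h
        obtain ⟨hmem, hrk, hmin⟩ := ih c.1 c.2 (by rw [hf])
        simp only [pvMinL] at h
        split at h
        · -- the tail's best c wins: c.1 < ry
          rename_i hlt
          obtain rfl : c = (r, s) := Option.some.inj h
          refine ⟨List.mem_cons_of_mem _ hmem, hrk, ?_⟩
          intro x hx r' hr'
          rcases List.mem_cons.mp hx with rfl | hx'
          · rw [hy] at hr'
            have := Option.some.inj hr'
            simp at hlt ⊢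
            omega
          · exact hmin x hx' r' hr'
        · -- the head y wins: ¬ c.1 < ry
          rename_i hge
          simp only [Option.some.injEq, Prod.mk.injEq] at h
          obtain ⟨rfl, rfl⟩ := h
          refine ⟨List.mem_cons_self .., hy, ?_⟩
          intro x hx r' hr'
          rcases List.mem_cons.mp hx with rfl | hx'
          · rw [hy] at hr'
            exact le_of_eq (Option.some.inj hr')
          · have := hmin x hx' r' hr'; omega

theorem pvLoopA_all_absent (ps xs : List String) (h : ∀ p ∈ ps, xs.contains p = false) :
    pvLoopA ps xs = xs.head? := by
  induction ps with
  | nil => rfl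
  | cons p ps ih =>
    simp only [pvLoopA, h p (List.mem_cons_self ..)]
    exact ih (fun q hq => h q (List.mem_cons_of_mem _ hq))

theorem pvContains_false_of_min (xs : List String) (r : Int)
    (hmin : ∀ x ∈ xs, ∀ r', pvRank.get? x = some r' → r ≤ r')
    (p : String) (j : Int) (hp : pvRank.get? p = some j) (hlt : j < r) :
    xs.contains p = false := by
  cases hc : xs.contains p
  · rfl
  · have hmem : p ∈ xs := by simpa using hc
    have := hmin p hmem j hp
    omega

-- ===== VERDICT (by name: the statement is the Claim_ definition above) =====
set_option maxHeartbeats 2000000 in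
theorem select_best_signal_match_py_spec : Claim_equal_select_best_signal_match_py := by
  intro xs _
  unfold Spec_select_best_signal_match_py select_best_signal_match_py select_best_signal_match_py_alt
  cases hf : xs.foldl pvStepB none with
  | none =>
    have hnone := pvFold_none xs hf
    have habs : ∀ p ∈ pvPriority, xs.contains p = false := by
      intro p hp
      cases hc : xs.contains p
      · rfl
      · have hmem : p ∈ xs := by simpa using hc
        have hrk := hnone p hmem
        simp only [pvPriority] at hp
        fin_cases hp <;> exact absurd hrk (by decide)
    simp [pvLoopA_all_absent pvPriority xs habs]
  | some b =>
    obtain ⟨hmem, hrk, hmin⟩ := pvFold_some xs b.1 b.2 (by rw [hf])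
    have hT : xs.contains b.2 = true := by simpa using hmem
    have hcf := pvContains_false_of_min xs b.1 hmin
    have hcases := pvRank_cases b.2 b.1 hrk
    simp only [pvPairs, List.mem_cons, List.not_mem_nil, or_false, Prod.mk.injEq] at hcases
    simp only [pvPriority, pvLoopA]
    rcases hcases with ⟨h1, h2⟩|⟨h1, h2⟩|⟨h1, h2⟩|⟨h1, h2⟩|⟨h1, h2⟩|⟨h1, h2⟩|⟨h1, h2⟩|
      ⟨h1, h2⟩|⟨h1, h2⟩|⟨h1, h2⟩|⟨h1, h2⟩|⟨h1, h2⟩|⟨h1, h2⟩|⟨h1, h2⟩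
    · rw [h1] at hT
      rw [hT]
      simp [h1]
    · rw [h1] at hT
      rw [hcf "PAYMENT" 0 (by decide) (by omega), hT]
      simp [h1]
    · rw [h1] at hT
      rw [hcf "PAYMENT" 0 (by decide) (by omega), hcf "CANCEL_BOOKING" 1 (by decide) (by omega), hT]
      simp [h1]
    · rw [h1] at hT
      rw [hcf "PAYMENT" 0 (by decide) (by omega), hcf "CANCEL_BOOKING" 1 (by decide) (by omega), hcf "MODIFY_BOOKING" 2 (by decide) (by omega), hT]
      simp [h1]
    · rw [h1] at hT
      rw [hcf "PAYMENT" 0 (by decide) (by omega), hcf "CANCEL_BOOKING" 1 (by decide) (by omega), hcf "MODIFY_BOOKING" 2 (by decide) (by omega), hcf "BOOKING_INQUIRY" 3 (by decide) (by omega), hT]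
      simp [h1]
    · rw [h1] at hT
      rw [hcf "PAYMENT" 0 (by decide) (by omega), hcf "CANCEL_BOOKING" 1 (by decide) (by omega), hcf "MODIFY_BOOKING" 2 (by decide) (by omega), hcf "BOOKING_INQUIRY" 3 (by decide) (by omega), hcf "AVAILABILITY" 4 (by decide) (by omega), hT]
      simp [h1]
    · rw [h1] at hT
      rw [hcf "PAYMENT" 0 (by decide) (by omega), hcf "CANCEL_BOOKING" 1 (by decide) (by omega), hcf "MODIFY_BOOKING" 2 (by decide) (by omega), hcf "BOOKING_INQUIRY" 3 (by decide) (by omega), hcf "AVAILABILITY" 4 (by decide) (by omega), hcf "CREATE_APPOINTMENT" 5 (by decide) (by omega), hT]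
      simp [h1]
    · rw [h1] at hT
      rw [hcf "PAYMENT" 0 (by decide) (by omega), hcf "CANCEL_BOOKING" 1 (by decide) (by omega), hcf "MODIFY_BOOKING" 2 (by decide) (by omega), hcf "BOOKING_INQUIRY" 3 (by decide) (by omega), hcf "AVAILABILITY" 4 (by decide) (by omega), hcf "CREATE_APPOINTMENT" 5 (by decide) (by omega), hcf "CREATE_RESERVATION" 6 (by decide) (by omega), hT]
      simp [h1]
    · rw [h1] at hT
      rw [hcf "PAYMENT" 0 (by decide) (by omega), hcf "CANCEL_BOOKING" 1 (by decide) (by omega), hcf "MODIFY_BOOKING" 2 (by decide) (by omega), hcf "BOOKING_INQUIRY" 3 (by decide) (by omega), hcf "AVAILABILITY" 4 (by decide) (by omega), hcf "CREATE_APPOINTMENT" 5 (by decide) (by omega), hcf "CREATE_RESERVATION" 6 (by decide) (by omega), hcf "QUOTE" 7 (by decide) (by omega), hT]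
      simp [h1]
    · rw [h1] at hT
      rw [hcf "PAYMENT" 0 (by decide) (by omega), hcf "CANCEL_BOOKING" 1 (by decide) (by omega), hcf "MODIFY_BOOKING" 2 (by decide) (by omega), hcf "BOOKING_INQUIRY" 3 (by decide) (by omega), hcf "AVAILABILITY" 4 (by decide) (by omega), hcf "CREATE_APPOINTMENT" 5 (by decide) (by omega), hcf "CREATE_RESERVATION" 6 (by decide) (by omega), hcf "QUOTE" 7 (by decide) (by omega), hcf "DETAILS" 8 (by decide) (by omega), hT]
      simp [h1]
    · rw [h1] at hT
      rw [hcf "PAYMENT" 0 (by decide) (by omega), hcf "CANCEL_BOOKING" 1 (by decide) (by omega), hcf "MODIFY_BOOKING" 2 (by decide) (by omega), hcf "BOOKING_INQUIRY" 3 (by decide) (by omega), hcf "AVAILABILITY" 4 (by decide) (by omega), hcf "CREATE_APPOINTMENT" 5 (by decide) (by omega), hcf "CREATE_RESERVATION" 6 (by decide) (by omega), hcf "QUOTE" 7 (by decide) (by omega), hcf "DETAILS" 8 (by decide) (by omega), hcf "DISCOVERY" 9 (by decide) (by omega), hT]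
      simp [h1]
    · rw [h1] at hT
      rw [hcf "PAYMENT" 0 (by decide) (by omega), hcf "CANCEL_BOOKING" 1 (by decide) (by omega), hcf "MODIFY_BOOKING" 2 (by decide) (by omega), hcf "BOOKING_INQUIRY" 3 (by decide) (by omega), hcf "AVAILABILITY" 4 (by decide) (by omega), hcf "CREATE_APPOINTMENT" 5 (by decide) (by omega), hcf "CREATE_RESERVATION" 6 (by decide) (by omega), hcf "QUOTE" 7 (by decide) (by omega), hcf "DETAILS" 8 (by decide) (by omega), hcf "DISCOVERY" 9 (by decide) (by omega), hcf "RECOMMENDATION" 10 (by decide) (by omega), hT]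
      simp [h1]
    · rw [h1] at hT
      rw [hcf "PAYMENT" 0 (by decide) (by omega), hcf "CANCEL_BOOKING" 1 (by decide) (by omega), hcf "MODIFY_BOOKING" 2 (by decide) (by omega), hcf "BOOKING_INQUIRY" 3 (by decide) (by omega), hcf "AVAILABILITY" 4 (by decide) (by omega), hcf "CREATE_APPOINTMENT" 5 (by decide) (by omega), hcf "CREATE_RESERVATION" 6 (by decide) (by omega), hcf "QUOTE" 7 (by decide) (by omega), hcf "DETAILS" 8 (by decide) (by omega), hcf "DISCOVERY" 9 (by decide) (by omega), hcf "RECOMMENDATION" 10 (by decide) (by omega), hcf "CONFIRM_BOOKING" 11 (by decide) (by omega), hT]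
      simp [h1]
    · rw [h1] at hT
      rw [hcf "PAYMENT" 0 (by decide) (by omega), hcf "CANCEL_BOOKING" 1 (by decide) (by omega), hcf "MODIFY_BOOKING" 2 (by decide) (by omega), hcf "BOOKING_INQUIRY" 3 (by decide) (by omega), hcf "AVAILABILITY" 4 (by decide) (by omega), hcf "CREATE_APPOINTMENT" 5 (by decide) (by omega), hcf "CREATE_RESERVATION" 6 (by decide) (by omega), hcf "QUOTE" 7 (by decide) (by omega), hcf "DETAILS" 8 (by decide) (by omega), hcf "DISCOVERY" 9 (by decide) (by omega), hcf "RECOMMENDATION" 10 (by decide) (by omega), hcf "CONFIRM_BOOKING" 11 (by decide) (by omega), hcf "PAYMENT_STATUS" 12 (by decide) (by omega), hT]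
      simp [h1]
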